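-- pv_equiv track=rewrite | github.com/MattimusRex/AdventOfCode2016 | Advent of Code 2016/Day 8/8_2.py | rotateRow
-- ===== SOURCE A (Python) =====
-- def rotateRow(row, distance):
--     newRow = [0] * len(row)
--     distance = int(distance)
--     i = 0
--     j = len(newRow) - distance
--     while i < len(newRow):
--         newRow[i] = row[j % len(newRow)]
--         i += 1
--         j += 1
--     return newRow
-- ===== SOURCE B (Python) =====
-- def rotateRow(row, distance):
--     if not row:
--         return []
--     d = int(distance) % len(row)
--     return row[-d:] + row[:-d]
-- ===== Notes on version B (the rewrite author's own statement) =====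
-- stated objective: simpler
-- what changed: Replaced the per-element modular-index while loop writing into a preallocated list by a single slice concatenation row[-d:] + row[:-d] with d = distance % len(row), guarding the empty list.
import Mathlib
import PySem

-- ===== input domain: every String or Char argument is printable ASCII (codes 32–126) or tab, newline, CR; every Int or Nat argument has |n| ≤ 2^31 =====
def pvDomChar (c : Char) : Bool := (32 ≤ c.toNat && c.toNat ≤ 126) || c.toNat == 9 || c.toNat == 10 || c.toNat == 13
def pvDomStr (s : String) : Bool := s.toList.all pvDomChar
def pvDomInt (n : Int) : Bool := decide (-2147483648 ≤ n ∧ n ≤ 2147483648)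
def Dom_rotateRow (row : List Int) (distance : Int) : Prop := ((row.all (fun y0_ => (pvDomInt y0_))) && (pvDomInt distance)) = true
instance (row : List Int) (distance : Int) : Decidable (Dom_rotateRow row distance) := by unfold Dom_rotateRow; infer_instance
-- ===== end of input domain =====

-- B replaces A's per-element modular-index while loop by a two-slice concatenation (simpler decomposition).


-- ===== PORT A =====
-- while i < len(newRow): newRow[i] = row[j % len(newRow)]; i += 1; j += 1
-- (fuel = number of remaining iterations; the index j % n is always in range when the loop runs,
--  so the `.getD 0` default of pyGet? is never used)
def rotALoop (row : List Int) (n : Int) : Nat → Int → Int → List Int → List Int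
  | 0, _, _, newRow => newRow
  | fuel + 1, i, j, newRow =>
      rotALoop row n fuel (i + 1) (j + 1)
        (newRow.set i.toNat ((PySem.List.pyGet? row (PySem.Int.mod j n)).getD 0))

def rotateRow (row : List Int) (distance : Int) : List Int :=
  let newRow := List.replicate row.length (0 : Int)
  rotALoop row (newRow.length : Int) newRow.length 0 ((newRow.length : Int) - distance) newRow

-- ===== PORT B =====
-- if not row: return [];  d = distance % len(row);  return row[-d:] + row[:-d]
def rotateRow_alt (row : List Int) (distance : Int) : List Int :=
  if row = [] then []
  else
    let d := PySem.Int.mod distance (row.length : Int)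
    PySem.List.slice row (some (-d)) none ++ PySem.List.slice row none (some (-d))

-- ===== PRECONDITION & SPEC =====
def Spec_rotateRow (row : List Int) (distance : Int) (out : List Int) : Prop := out = rotateRow_alt row distance
instance (row : List Int) (distance : Int) (out : List Int) : Decidable (Spec_rotateRow row distance out) := by unfold Spec_rotateRow; infer_instance

-- ===== CLAIM (what is proved, stated in full; the proofs are below) =====
def Claim_equal_rotateRow : Prop := ∀ (row : List Int) (distance : Int), Dom_rotateRow row distance → Spec_rotateRow row distance (rotateRow row distance)

-- ===== LEMMAS AND PROOFS =====

lemma rotALoop_getElem? (row : List Int) (n : Int) (hn : n = (row.length : Int))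
    (hpos : 0 < row.length) :
    ∀ (f : Nat) (i j : Int) (acc : List Int), 0 ≤ i →
    ∀ (m : Nat),
      (rotALoop row n f i j acc)[m]? =
        if i.toNat ≤ m ∧ m < i.toNat + f ∧ m < acc.length then
          some (row.getD (PySem.Int.mod (j + ((m : Int) - i.toNat)) n).toNat 0)
        else acc[m]? := by
  intro f
  induction f with
  | zero =>
      intro i j acc hi m
      simp [rotALoop]
      omega
  | succ f ih =>
      intro i j acc hi m
      have hnpos : (0:Int) < n := by rw [hn]; exact_mod_cast hpos
      rw [rotALoop]
      rw [ih (i + 1) (j + 1) _ (by omega) m]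
      have hi1 : (i + 1).toNat = i.toNat + 1 := by omega
      have hlen : (acc.set i.toNat ((PySem.List.pyGet? row (PySem.Int.mod j n)).getD 0)).length = acc.length := by
        simp
      rw [hlen, hi1]
      by_cases h1 : i.toNat + 1 ≤ m ∧ m < i.toNat + 1 + f ∧ m < acc.length
      · rw [if_pos h1, if_pos (by omega)]
        have heq : j + 1 + ((m : Int) - (i.toNat + 1 : Nat)) = j + ((m : Int) - i.toNat) := by
          push_cast
          omega
        rw [heq]
      · rw [if_neg h1]
        by_cases h2 : i.toNat ≤ m ∧ m < i.toNat + (f + 1) ∧ m < acc.length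
        · -- then m = i.toNat, the position just set
          have hm : m = i.toNat := by omega
          rw [if_pos h2]
          subst hm
          rw [List.getElem?_set_self (by simpa using h2.2.2)]
          have hv : (PySem.List.pyGet? row (PySem.Int.mod j n)).getD 0 =
              row.getD (PySem.Int.mod j n).toNat 0 := by
            have h0 : 0 ≤ PySem.Int.mod j n := PySem.Int.mod_nonneg j hnpos
            rw [PySem.List.pyGet?_of_nonneg row h0, List.getD_eq_getElem?_getD]
          rw [hv]
          norm_num
        · rw [if_neg h2]
          by_cases hml : m < acc.length
          · rw [List.getElem?_set_ne (show i.toNat ≠ m by omega)]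
          · rw [List.getElem?_eq_none (by simp; omega), List.getElem?_eq_none (by omega)]

theorem rotateRow_spec : Claim_equal_rotateRow := by
  unfold Claim_equal_rotateRow
  intro row distance _
  unfold Spec_rotateRow rotateRow rotateRow_alt
  by_cases hne : row = []
  · subst hne; simp [rotALoop]
  have hpos : 0 < row.length := List.length_pos_iff.mpr hne
  rw [if_neg hne]
  simp only [List.length_replicate]
  set n : Nat := row.length with hn
  set d : Int := PySem.Int.mod distance (n : Int) with hd
  have hnpos : (0:Int) < (n : Int) := by exact_mod_cast hpos
  have hd0 : 0 ≤ d := PySem.Int.mod_nonneg _ hnpos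
  have hdlt : d < (n : Int) := PySem.Int.mod_lt _ hnpos
  -- the key modular identity: (n - distance + m) % n is the rotated source index
  have key : ∀ m : Nat, m < n →
      PySem.Int.mod ((n : Int) - distance + m) (n : Int) =
        if (m : Int) < d then (m : Int) - d + n else (m : Int) - d := by
    intro m hm
    have hemod : PySem.Int.mod ((n : Int) - distance + m) (n : Int) =
        ((n : Int) - distance + m) % (n : Int) :=
      PySem.Int.mod_eq_emod_of_pos hnpos
    have hdemod : d = distance % (n : Int) := by
      rw [hd]; exact PySem.Int.mod_eq_emod_of_pos hnpos
    have hsub : ((n : Int) - distance + m) % (n : Int) = ((m : Int) - d) % (n : Int) := by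
      conv_lhs => rw [show (n : Int) - distance + m = ((m : Int) - distance) + 1 * (n : Int) by ring]
      rw [Int.add_mul_emod_self_right]
      rw [hdemod, Int.sub_emod ((m:Int)) distance, Int.sub_emod ((m:Int)) (distance % (n:Int)),
        Int.emod_emod_of_dvd _ (dvd_refl _)]
    rw [hemod, hsub]
    by_cases hc : (m : Int) < d
    · rw [if_pos hc]
      have hshift : ((m : Int) - d + n) % (n : Int) = ((m : Int) - d) % (n : Int) := by
        conv_lhs => rw [show (m : Int) - d + n = ((m : Int) - d) + 1 * (n : Int) by ring]
        rw [Int.add_mul_emod_self_right]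
      rw [← hshift]
      exact Int.emod_eq_of_lt (by omega) (by omega)
    · rw [if_neg hc]
      exact Int.emod_eq_of_lt (by omega) (by omega)
  -- the loop's elementwise description, specialised to the actual start state
  have hA : ∀ m : Nat,
      (rotALoop row (n : Int) n 0 ((n : Int) - distance) (List.replicate n (0:Int)))[m]? =
        if m < n then
          some (row.getD (PySem.Int.mod ((n : Int) - distance + m) (n : Int)).toNat 0)
        else none := by
    intro m
    rw [rotALoop_getElem? row (n : Int) (by exact_mod_cast hn) hpos n 0
      ((n : Int) - distance) (List.replicate n (0:Int)) le_rfl m]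
    simp only [Int.toNat_zero, Nat.cast_zero, sub_zero, List.length_replicate, zero_add]
    by_cases hm : m < n
    · rw [if_pos ⟨Nat.zero_le m, hm, hm⟩, if_pos hm]
    · rw [if_neg (by omega), if_neg hm, List.getElem?_eq_none (by simp; omega)]
  apply List.ext_getElem?
  intro m
  rw [hA m]
  by_cases hm : m < n
  · rw [if_pos hm, key m hm]
    have hgetD : ∀ (k : Nat) (hk : k < n), row.getD k 0 = row[k]'(by omega) := by
      intro k hk
      rw [List.getD_eq_getElem?_getD, List.getElem?_eq_getElem (by omega)]
      rfl
    by_cases hc : (m : Int) < d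
    · -- m comes from the tail slice row[-d:]
      rw [if_pos hc]
      have hdn : 0 < d.toNat := by omega
      have hidx : ((m : Int) - d + n).toNat = n - d.toNat + m := by omega
      rw [hidx, hgetD _ (by omega)]
      have hmn : -d = -((d.toNat : Nat) : Int) := by omega
      rw [hmn, PySem.List.slice_from_neg_natCast row d.toNat (by omega), ← hn]
      rw [List.getElem?_append_left (by simp; omega)]
      rw [List.getElem?_drop, List.getElem?_eq_getElem (by omega)]
    · -- m comes from the head slice row[:-d]
      rw [if_neg hc]
      have hidx : ((m : Int) - d).toNat = m - d.toNat := by omega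
      rw [hidx]
      rcases (show d = 0 ∨ 0 < d by omega) with h0 | h0
      · have hz : d.toNat = 0 := by omega
        rw [hz, Nat.sub_zero, hgetD m hm, h0]
        simp only [neg_zero]
        rw [PySem.List.slice_from row (show (0:Int) ≤ 0 by norm_num),
          PySem.List.slice_to row (show (0:Int) ≤ 0 by norm_num)]
        simp only [Int.toNat_zero, List.drop_zero, List.take_zero, List.append_nil]
        rw [List.getElem?_eq_getElem (by omega)]
      · rw [hgetD (m - d.toNat) (by omega)]
        have hmn : -d = -((d.toNat : Nat) : Int) := by omega
        rw [hmn, PySem.List.slice_from_neg_natCast row d.toNat (by omega),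
          PySem.List.slice_to_neg_natCast row d.toNat (by omega), ← hn]
        rw [List.getElem?_append_right (by simp; omega)]
        have hlen : (row.drop (n - d.toNat)).length = d.toNat := by simp; omega
        rw [hlen]
        rw [List.getElem?_take_of_lt (by omega), List.getElem?_eq_getElem (by omega)]
  · rw [if_neg hm]
    symm
    apply List.getElem?_eq_none
    rcases (show d = 0 ∨ 0 < d by omega) with h0 | h0
    · simp only [h0, neg_zero]
      rw [PySem.List.slice_from row (show (0:Int) ≤ 0 by norm_num),
        PySem.List.slice_to row (show (0:Int) ≤ 0 by norm_num)]
      simp only [Int.toNat_zero, List.drop_zero, List.take_zero, List.append_nil]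
      omega
    · have hmn : -d = -((d.toNat : Nat) : Int) := by omega
      rw [hmn, PySem.List.slice_from_neg_natCast row d.toNat (by omega),
        PySem.List.slice_to_neg_natCast row d.toNat (by omega)]
      simp only [List.length_append, List.length_drop, List.length_take]
      omega
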